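-- pv_equiv track=rewrite | github.com/StianTt/DAT120_Prosjekt | Øving 4.py | sorted_storre_enn_5
-- ===== SOURCE A (Python) =====
-- def sorted_storre_enn_5(z):
--     # Sort the list 'z' in ascending order
--     z.sort()  # Remove the assignment to 'z' here
--
--     storage = []
--
--     # Iterate through the sorted list
--     for i in z:  # No runtime error on this line after fixing the sorting
--         if i > 5:
--             # Check if the number 'i' is already in storage
--             found = False
--             for item in storage:
--                 if item[0] == i:
--                     # If it's in storage, increment the count (item[1])
--                     item[1] += 1
--                     found = True
--                     break
--
--             # If not in storage, add it as [i, 1]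
--             if not found:
--                 storage.append([i, 1])
--
--     return storage
-- ===== SOURCE B (Python) =====
-- def sorted_storre_enn_5(z):
--     # Like A, sorts z in place (same observable side effect), then a single
--     # linear pass: duplicates are adjacent after sorting, so each value > 5
--     # either extends the last group or starts a new one.
--     z.sort()
--     out = []
--     for i in z:
--         if i > 5:
--             if out and out[-1][0] == i:
--                 out[-1][1] += 1
--             else:
--                 out.append([i, 1])
--     return out
-- ===== Notes on version B (the rewrite author's own statement) =====
-- stated objective: faster
-- what changed: A rescans its whole storage list for every element > 5; B exploits that the list is sorted, so equal values are adjacent, and only compares each element with the last group, giving one linear pass after the sort.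
import Mathlib
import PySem

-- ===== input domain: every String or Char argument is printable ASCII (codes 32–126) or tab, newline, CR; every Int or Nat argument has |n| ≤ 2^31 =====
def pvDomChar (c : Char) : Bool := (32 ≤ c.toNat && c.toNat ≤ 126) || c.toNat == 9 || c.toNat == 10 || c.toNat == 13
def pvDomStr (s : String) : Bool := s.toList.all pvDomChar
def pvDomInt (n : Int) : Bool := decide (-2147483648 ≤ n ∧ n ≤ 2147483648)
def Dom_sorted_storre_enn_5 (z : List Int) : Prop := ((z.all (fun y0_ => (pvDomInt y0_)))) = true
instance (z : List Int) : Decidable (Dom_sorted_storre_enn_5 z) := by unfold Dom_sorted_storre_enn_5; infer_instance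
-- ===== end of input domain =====

-- A rescans its whole storage list for every element > 5; B sorts the same way and then
-- does one linear pass, comparing each element only with the last group (duplicates are
-- adjacent after sorting). Both Pythons sort z in place; the equivalence proved is about
-- the return value (B performs the same mutation).


-- ===== PORT A =====
-- item[1] += 1 : index 1 is always in range on the [i, 1] items the code builds,
-- so the `none` fallback is unreachable; List.set 1 is exact for item[1] = v+1 here.
def pvIncAt1 (item : List Int) : List Int :=
  match PySem.List.pyGet? item 1 with
  | some v => item.set 1 (v + 1)
  | none => item

-- A's inner `for item in storage: if item[0] == i: item[1] += 1; break`
-- (none = the loop fell through, `found` stayed False)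
def pvBumpA (i : Int) : List (List Int) → Option (List (List Int))
  | [] => none
  | item :: rest =>
      if PySem.List.pyGet? item 0 = some i then some (pvIncAt1 item :: rest)
      else (pvBumpA i rest).map (item :: ·)

def pvStepA (st : List (List Int)) (i : Int) : List (List Int) :=
  if 5 < i then
    match pvBumpA i st with
    | some st' => st'
    | none => st ++ [[i, 1]]
  else st

def sorted_storre_enn_5 (z : List Int) : List (List Int) :=
  (PySem.List.sorted z (fun x => x) false).foldl pvStepA []

-- ===== PORT B =====
-- `if out and out[-1][0] == i:` — out[-1] is getLast? (none = out empty);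
-- `out[-1][1] += 1` replaces the last item by its incremented copy.
def pvStepB (out : List (List Int)) (i : Int) : List (List Int) :=
  if 5 < i then
    match out.getLast? with
    | some item =>
        if PySem.List.pyGet? item 0 = some i then out.dropLast ++ [pvIncAt1 item]
        else out ++ [[i, 1]]
    | none => out ++ [[i, 1]]
  else out

def sorted_storre_enn_5_alt (z : List Int) : List (List Int) :=
  (PySem.List.sorted z (fun x => x) false).foldl pvStepB []

-- ===== PRECONDITION & SPEC =====
def Spec_sorted_storre_enn_5 (z : List Int) (out : List (List Int)) : Prop := out = sorted_storre_enn_5_alt z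
instance (z : List Int) (out : List (List Int)) : Decidable (Spec_sorted_storre_enn_5 z out) := by unfold Spec_sorted_storre_enn_5; infer_instance

-- ===== CLAIM (what is proved, stated in full; the proofs are below) =====
def Claim_equal_sorted_storre_enn_5 : Prop := ∀ (z : List Int), Dom_sorted_storre_enn_5 z → Spec_sorted_storre_enn_5 z (sorted_storre_enn_5 z)

-- ===== LEMMAS AND PROOFS =====

-- every storage item has the shape [k, c]
def pvWF (st : List (List Int)) : Prop := ∀ it ∈ st, ∃ k c, it = [k, c]

lemma pvIncAt1_pair (k c : Int) : pvIncAt1 [k, c] = [k, c + 1] := by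
  simp [pvIncAt1, PySem.List.pyGet?, PySem.List.pyIdx?]

lemma pvGet0_pair (k c : Int) : PySem.List.pyGet? [k, c] 0 = some k := by
  simp [PySem.List.pyGet?, PySem.List.pyIdx?]

-- A's inner scan, characterised on a storage whose keys are strictly increasing
-- and all ≤ i: a hit can only be the last item.
lemma pvBumpA_char (i : Int) (st : List (List Int)) (hwf : pvWF st)
    (hpw : st.Pairwise (fun a b => a.headI < b.headI))
    (hle : ∀ it ∈ st, it.headI ≤ i) :
    pvBumpA i st =
      match st.getLast? with
      | some item => if item.headI = i then some (st.dropLast ++ [pvIncAt1 item]) else none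
      | none => none := by
  induction st with
  | nil => rfl
  | cons item rest ih =>
    obtain ⟨k, c, hk⟩ := hwf item (List.mem_cons_self ..)
    by_cases hki : k = i
    · have hrest : rest = [] := by
        cases rest with
        | nil => rfl
        | cons r t =>
          exfalso
          have h1 : item.headI < r.headI := (List.pairwise_cons.mp hpw).1 r (List.mem_cons_self ..)
          have h1' : k < r.headI := by simpa [hk] using h1
          have h2 : r.headI ≤ i := hle r (by simp)
          omega
      subst hrest hki
      simp [pvBumpA, hk]
    · have hbump : pvBumpA i (item :: rest) = (pvBumpA i rest).map (item :: ·) := by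
        rw [pvBumpA, hk, pvGet0_pair]
        simp [hki]
      have hrest := ih (fun it h => hwf it (List.mem_cons_of_mem _ h))
        (List.pairwise_cons.mp hpw).2
        (fun it h => hle it (List.mem_cons_of_mem _ h))
      cases rest with
      | nil => simp [pvBumpA, hk, hki]
      | cons r t =>
        rw [hbump, hrest]
        cases hgl : (r :: t).getLast? with
        | none => simp at hgl
        | some last =>
          by_cases hli : last.headI = i
          · simp [hli, List.getLast?_cons_cons, hgl]
          · simp [hli, List.getLast?_cons_cons, hgl]

-- one loop iteration agrees under the invariant
lemma pvStep_eq (i : Int) (st : List (List Int)) (hwf : pvWF st)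
    (hpw : st.Pairwise (fun a b => a.headI < b.headI))
    (hle : ∀ it ∈ st, it.headI ≤ i) :
    pvStepA st i = pvStepB st i := by
  unfold pvStepA pvStepB
  by_cases h5 : 5 < i
  · rw [pvBumpA_char i st hwf hpw hle]
    cases hgl : st.getLast? with
    | none => simp [h5]
    | some item =>
      obtain ⟨k, c, hk⟩ := hwf item (List.mem_of_getLast? hgl)
      by_cases hki : item.headI = i
      · have hget : PySem.List.pyGet? item 0 = some i := by
          rw [hk] at hki ⊢; simp at hki; rw [pvGet0_pair, hki]
        simp [h5, hki, hget]
      · have hget : ¬ PySem.List.pyGet? item 0 = some i := by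
          rw [hk] at hki ⊢; simp at hki; rw [pvGet0_pair]; simp [hki]
        simp [h5, hki, hget]
  · simp [h5]

-- the invariant is preserved by one iteration of B's loop
lemma pv_inv_step (i : Int) (s' : List Int) (st : List (List Int)) (hwf : pvWF st)
    (hpw : st.Pairwise (fun a b => a.headI < b.headI))
    (hle : ∀ it ∈ st, ∀ x ∈ i :: s', it.headI ≤ x)
    (his' : ∀ x ∈ s', i ≤ x) :
    pvWF (pvStepB st i) ∧ (pvStepB st i).Pairwise (fun a b => a.headI < b.headI) ∧
      (∀ it ∈ pvStepB st i, ∀ x ∈ s', it.headI ≤ x) := by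
  have hleS : ∀ it ∈ st, ∀ x ∈ s', it.headI ≤ x :=
    fun it h x hx => hle it h x (List.mem_cons_of_mem _ hx)
  unfold pvStepB
  by_cases h5 : 5 < i
  · cases hgl : st.getLast? with
    | none =>
      have hnil : st = [] := List.getLast?_eq_none_iff.mp hgl
      subst hnil
      refine ⟨?_, ?_, ?_⟩
      · intro it h; simp [h5] at h; exact ⟨i, 1, h⟩
      · simp [h5]
      · intro it h x hx; simp [h5] at h; subst h; simpa using his' x hx
    | some item =>
      have hdec : st.dropLast ++ [item] = st := List.dropLast_append_getLast? item hgl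
      obtain ⟨k, c, hk⟩ := hwf item (List.mem_of_getLast? hgl)
      have hpw' : st.dropLast.Pairwise (fun a b => a.headI < b.headI) ∧
          ∀ a ∈ st.dropLast, a.headI < item.headI := by
        have := hpw; rw [← hdec] at this
        have h := List.pairwise_append.mp this
        exact ⟨h.1, fun a ha => h.2.2 a ha item (by simp)⟩
      by_cases hget : PySem.List.pyGet? item 0 = some i
      · -- last group matches: keys unchanged
        have hkey : k = i := by rw [hk, pvGet0_pair] at hget; exact Option.some.inj hget
        have hinc : pvIncAt1 item = [k, c + 1] := by rw [hk]; exact pvIncAt1_pair k c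
        have hkeyinc : (pvIncAt1 item).headI = item.headI := by rw [hinc, hk]; simp
        simp only [h5, if_true, hget]
        refine ⟨?_, ?_, ?_⟩
        · intro it h
          rcases List.mem_append.mp h with h | h
          · exact hwf it (List.mem_of_mem_dropLast h)
          · simp at h; subst h; exact ⟨k, c + 1, hinc⟩
        · refine List.pairwise_append.mpr ⟨hpw'.1, by simp, ?_⟩
          intro a ha b hb; simp at hb; subst hb
          rw [hkeyinc]; exact hpw'.2 a ha
        · intro it h x hx
          rcases List.mem_append.mp h with h | h
          · exact hleS it (List.mem_of_mem_dropLast h) x hx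
          · simp at h; subst h
            rw [hkeyinc, hk]; simp [hkey]; exact his' x hx
      · -- no match: every key is < i, append [i, 1]
        have hlt : ∀ a ∈ st, a.headI < i := by
          intro a ha
          rw [← hdec] at ha
          rcases List.mem_append.mp ha with h | h
          · calc a.headI < item.headI := hpw'.2 a h
              _ ≤ i := hle item (List.mem_of_getLast? hgl) i (List.mem_cons_self ..)
          · simp at h; subst h
            have h1 : a.headI ≤ i := hle a (List.mem_of_getLast? hgl) i (List.mem_cons_self ..)
            have h2 : a.headI ≠ i := by
              intro hcon
              apply hget
              rw [hk] at hcon ⊢; simp at hcon; rw [pvGet0_pair, hcon]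
            omega
        simp only [h5, if_true, hget, if_false]
        refine ⟨?_, ?_, ?_⟩
        · intro it h
          rcases List.mem_append.mp h with h | h
          · exact hwf it h
          · simp at h; subst h; exact ⟨i, 1, rfl⟩
        · refine List.pairwise_append.mpr ⟨hpw, by simp, ?_⟩
          intro a ha b hb; simp at hb; subst hb
          simpa using hlt a ha
        · intro it h x hx
          rcases List.mem_append.mp h with h | h
          · exact hleS it h x hx
          · simp at h; subst h; simpa using his' x hx
  · simp only [h5, if_false]
    exact ⟨hwf, hpw, hleS⟩

-- main loop lemma: both folds agree from any storage satisfying the invariant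
lemma pv_fold_eq (s : List Int) : ∀ (st : List (List Int)),
    pvWF st →
    st.Pairwise (fun a b => a.headI < b.headI) →
    (∀ it ∈ st, ∀ x ∈ s, it.headI ≤ x) →
    s.Pairwise (· ≤ ·) →
    s.foldl pvStepA st = s.foldl pvStepB st := by
  induction s with
  | nil => intro st _ _ _ _; rfl
  | cons i s' ih =>
    intro st hwf hpw hle hs
    have hlei : ∀ it ∈ st, it.headI ≤ i := fun it h => hle it h i (List.mem_cons_self ..)
    have his' : ∀ x ∈ s', i ≤ x := fun x hx => (List.pairwise_cons.mp hs).1 x hx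
    obtain ⟨hwf', hpw', hle'⟩ := pv_inv_step i s' st hwf hpw hle his'
    simp only [List.foldl_cons, pvStep_eq i st hwf hpw hlei]
    exact ih (pvStepB st i) hwf' hpw' hle' (List.pairwise_cons.mp hs).2

-- ===== VERDICT (by name: the statement is the Claim_ definition above) =====
theorem sorted_storre_enn_5_spec : Claim_equal_sorted_storre_enn_5 := by
  intro z _
  unfold Spec_sorted_storre_enn_5 sorted_storre_enn_5 sorted_storre_enn_5_alt
  exact pv_fold_eq _ [] (by intro it h; cases h) (by simp) (by intro it h; cases h)
    (PySem.List.sorted_pairwise z (fun x => x))
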